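-- pv_equiv track=rewrite | github.com/eaubry42/computerv1 | parser.py | get_coefficients_array
-- ===== SOURCE A (Python) =====
-- def get_coefficients_array(coefficients):
--     """Convert coefficients dictionary to array format expected by solver"""
--     if not coefficients:
--         return ["0"]
--
--     max_power = max(coefficients.keys())
--     result = []
--
--     for power in range(max_power + 1):
--         coeff = coefficients.get(power, 0)
--         result.append(str(coeff))
--
--     return result
-- ===== SOURCE B (Python) =====
-- def get_coefficients_array(coefficients):
--     """Convert coefficients dictionary to array format expected by solver"""
--     if not coefficients:
--         return ["0"]
--
--     max_power = max(coefficients)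
--     result = ["0"] * (max_power + 1)
--
--     for power, coeff in coefficients.items():
--         if power >= 0:
--             result[power] = str(coeff)
--
--     return result
-- ===== Notes on version B (the rewrite author's own statement) =====
-- stated objective: alternative
-- what changed: B preallocates a dense array of "0" strings and scatters each dict entry into its slot, instead of A's gather loop doing one dict lookup per power 0..max_power.
import Mathlib
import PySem

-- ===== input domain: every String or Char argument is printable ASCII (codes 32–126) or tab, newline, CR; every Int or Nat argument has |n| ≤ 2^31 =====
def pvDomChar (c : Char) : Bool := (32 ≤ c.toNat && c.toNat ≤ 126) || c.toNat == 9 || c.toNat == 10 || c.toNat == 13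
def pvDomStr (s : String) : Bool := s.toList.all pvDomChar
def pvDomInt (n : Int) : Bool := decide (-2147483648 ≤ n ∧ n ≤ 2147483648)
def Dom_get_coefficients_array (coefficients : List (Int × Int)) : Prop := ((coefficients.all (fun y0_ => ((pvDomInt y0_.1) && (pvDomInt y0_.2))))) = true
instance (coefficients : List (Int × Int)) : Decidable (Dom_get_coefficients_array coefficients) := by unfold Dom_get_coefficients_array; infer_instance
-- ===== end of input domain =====

-- B scatters each dict entry into a preallocated ["0"]-array instead of A's gather loop
-- doing one dict lookup per power 0..max_power (objective: alternative decomposition).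


-- ===== PORT A =====
def get_coefficients_array (coefficients : List (Int × Int)) : List String :=
  if coefficients = [] then ["0"]
  else
    match PySem.List.max? (coefficients.map Prod.fst) (fun x => x) with
    | none => []   -- unreachable: keys of a non-empty dict are non-empty
    | some max_power =>
      (PySem.List.pyRange 0 (max_power + 1) 1).foldl
        (fun result power =>
          result ++ [PySem.Int.toStr ((PySem.Dict.mk coefficients).getD power 0)]) []

-- ===== PORT B =====
def get_coefficients_array_alt (coefficients : List (Int × Int)) : List String :=
  if coefficients = [] then ["0"]
  else
    match PySem.List.max? (coefficients.map Prod.fst) (fun x => x) with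
    | none => []   -- unreachable: keys of a non-empty dict are non-empty
    | some max_power =>
      coefficients.foldl
        (fun result pc =>
          if 0 ≤ pc.1 then PySem.List.pySetD result pc.1 (PySem.Int.toStr pc.2) else result)
        (List.replicate (max_power + 1).toNat "0")

-- ===== PRECONDITION & SPEC =====
-- Pre_ excludes association lists with duplicate keys, which cannot arise from a real Python
-- dict argument; on them A reads the first binding of a key while B's scatter keeps the last,
-- and neither order is specified.
def Pre_get_coefficients_array (coefficients : List (Int × Int)) : Prop :=
  (coefficients.map Prod.fst).Nodup
instance (coefficients : List (Int × Int)) : Decidable (Pre_get_coefficients_array coefficients) := by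
  unfold Pre_get_coefficients_array; infer_instance

def pvWitness_get_coefficients_array : (List (Int × Int)) := [(2, 7), (-1, 3), (0, -4)]

def Spec_get_coefficients_array (coefficients : List (Int × Int)) (out : List String) : Prop := out = get_coefficients_array_alt coefficients
instance (coefficients : List (Int × Int)) (out : List String) : Decidable (Spec_get_coefficients_array coefficients out) := by unfold Spec_get_coefficients_array; infer_instance

-- ===== CLAIM (what is proved, stated in full; the proofs are below) =====
def Claim_equal_get_coefficients_array : Prop := ∀ (coefficients : List (Int × Int)), Dom_get_coefficients_array coefficients → Pre_get_coefficients_array coefficients → Spec_get_coefficients_array coefficients (get_coefficients_array coefficients)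

-- ===== LEMMAS AND PROOFS =====

-- A's append-loop is a map over the range.
theorem foldl_append_map {α β : Type} (l : List α) (f : α → β) (init : List β) :
    l.foldl (fun acc x => acc ++ [f x]) init = init ++ l.map f := by
  induction l generalizing init with
  | nil => simp
  | cons x t ih => simp [List.foldl, ih, List.append_assoc]

-- first-match lookup of a literal dict is List.find? on the association list
theorem get?_mk_eq_find (l : List (Int × Int)) (k : Int) :
    (PySem.Dict.mk l).get? k = (l.find? (fun pc => pc.1 == k)).map Prod.snd := by
  induction l with
  | nil => rfl
  | cons p t ih =>
    rw [PySem.Dict.get?_mk_cons]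
    by_cases h : p.1 = k
    · simp [h, List.find?]
    · have hb : (p.1 == k) = false := by simp [h]
      simp only [List.find?, hb, ih]
      simp [h]

theorem length_scatter (l : List (Int × Int)) (arr : List String) :
    (l.foldl (fun result pc =>
        if 0 ≤ pc.1 then PySem.List.pySetD result pc.1 (PySem.Int.toStr pc.2) else result) arr).length
      = arr.length := by
  induction l generalizing arr with
  | nil => rfl
  | cons p t ih =>
    simp only [List.foldl]
    rw [ih]
    split
    · next h => rw [PySem.List.pySetD_of_nonneg _ _ h, List.length_set]
    · rfl

-- element i of the scatter loop: the unique binding of key i if any, else the initial value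
theorem scatter_getElem? (l : List (Int × Int)) (arr : List String) (i : Nat)
    (hi : i < arr.length) (hnd : (l.map Prod.fst).Nodup) :
    (l.foldl (fun result pc =>
        if 0 ≤ pc.1 then PySem.List.pySetD result pc.1 (PySem.Int.toStr pc.2) else result) arr)[i]?
      = match l.find? (fun pc => pc.1 == (i : Int)) with
        | some pc => some (PySem.Int.toStr pc.2)
        | none => arr[i]? := by
  induction l generalizing arr with
  | nil => rfl
  | cons p t ih =>
    simp only [List.map, List.nodup_cons] at hnd
    obtain ⟨hp, hnd'⟩ := hnd
    simp only [List.foldl, List.find?]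
    by_cases hk : p.1 = (i : Int)
    · -- key i is bound here; nodup ⇒ no binding of i in t
      have hpk : (p.1 == (i : Int)) = true := by simp [hk]
      have h0 : (0 : Int) ≤ p.1 := hk ▸ Int.natCast_nonneg i
      have hfind : t.find? (fun pc => pc.1 == (i : Int)) = none := by
        rw [List.find?_eq_none]
        intro pc hpc hbeq
        have heq : pc.1 = p.1 := by
          have := of_decide_eq_true hbeq; omega
        exact hp (heq ▸ List.mem_map_of_mem hpc)
      rw [if_pos h0, PySem.List.pySetD_of_nonneg _ _ h0]
      rw [ih _ (by rw [List.length_set]; exact hi) hnd', hfind, hpk]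
      have hidx : p.1.toNat = i := by omega
      simp [List.getElem?_set, hidx, hi]
    · have hpk : (p.1 == (i : Int)) = false := by simp [hk]
      rw [hpk]
      by_cases h0 : (0 : Int) ≤ p.1
      · rw [if_pos h0, PySem.List.pySetD_of_nonneg _ _ h0]
        rw [ih _ (by rw [List.length_set]; exact hi) hnd']
        have hne : p.1.toNat ≠ i := by omega
        cases hf : t.find? (fun pc => pc.1 == (i : Int)) with
        | some pc => simp [hf]
        | none => simp [hf, List.getElem?_set, hne]
      · rw [if_neg h0]
        exact ih _ hi hnd'

theorem get_coefficients_array_eq (coefficients : List (Int × Int))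
    (hpre : (coefficients.map Prod.fst).Nodup) :
    get_coefficients_array coefficients = get_coefficients_array_alt coefficients := by
  unfold get_coefficients_array get_coefficients_array_alt
  by_cases hne : coefficients = []
  · simp [hne]
  · rw [if_neg hne, if_neg hne]
    cases hmax : PySem.List.max? (coefficients.map Prod.fst) (fun x => x) with
    | none =>
      exact absurd ((PySem.List.max?_eq_none_iff _ _).mp hmax) (by simpa using hne)
    | some m =>
      have hbound : ∀ pc ∈ coefficients, pc.1 ≤ m := fun pc hpc =>
        PySem.List.max?_isMax hmax pc.1 (List.mem_map_of_mem hpc)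
      dsimp only
      rw [foldl_append_map, PySem.List.pyRange_one, List.map_map]
      simp only [Int.sub_zero, List.nil_append]
      apply List.ext_getElem?
      intro i
      by_cases hi : i < (m + 1).toNat
      · have harr : i < (List.replicate (m + 1).toNat "0").length := by simpa using hi
        rw [scatter_getElem? _ _ _ harr hpre]
        have hzi : (0 : Int) + (i : Int) = (i : Int) := by omega
        simp only [List.getElem?_map, List.getElem?_range hi, Option.map_some,
          Function.comp_apply, hzi]
        rw [PySem.Dict.getD_eq_get?_getD, get?_mk_eq_find]
        cases hf : coefficients.find? (fun pc => pc.1 == (i : Int)) with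
        | some pc => simp [hf]
        | none => simp [hf, List.getElem?_replicate, hi]; rfl
      · have h2len : (coefficients.foldl (fun result pc =>
            if 0 ≤ pc.1 then PySem.List.pySetD result pc.1 (PySem.Int.toStr pc.2) else result)
            (List.replicate (m + 1).toNat "0")).length = (m + 1).toNat := by
          rw [length_scatter, List.length_replicate]
        rw [List.getElem?_eq_none (by simp [Nat.le_of_not_lt hi]),
          List.getElem?_eq_none (by rw [h2len]; exact Nat.le_of_not_lt hi)]

-- ===== VERDICT (by name: the statement is the Claim_ definition above) =====
theorem get_coefficients_array_spec : Claim_equal_get_coefficients_array := by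
  intro coefficients _ hpre
  unfold Spec_get_coefficients_array
  exact get_coefficients_array_eq coefficients hpre
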